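-- pv_equiv track=rewrite | github.com/James01010101/YouTube_Shorts_Editing | Automation/Make_Video_Helpers.py | make_one_word_per_line
-- ===== SOURCE A (Python) =====
-- def make_one_word_per_line(raw_text):
--     temp_text = ""
--     lines = []
--     num_nl = 0
--     temp_nl = num_nl
--
--     words = raw_text.split()
--     num_nl = len(words)-1
--     temp_nl = num_nl
--
--     for i in range(1, len(words)+1):
--         temp_nl = num_nl
--         temp_text = ""
--         for x in range(i):
--             if temp_nl > 0:
--                 temp_text += words[x] + '\n'
--                 temp_nl -= 1
--             else:
--                 temp_text += words[x]
--
--         # add the rest of the nl's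
--         for y in range(temp_nl):
--             temp_text += '\n'
--         lines.append(temp_text)
--
--     return lines
-- ===== SOURCE B (Python) =====
-- def make_one_word_per_line(raw_text):
--     words = raw_text.split()
--     n = len(words)
--     return ['\n'.join(words[:i]) + '\n' * (n - i) for i in range(1, n + 1)]
-- ===== Notes on version B (the rewrite author's own statement) =====
-- stated objective: simpler
-- what changed: Replaces the nested loop with a per-word newline counter (temp_nl) plus a separate trailing-padding loop by a single list comprehension whose line i is the closed form: the first i words joined by newlines, followed by n-i padding newlines.
import Mathlib
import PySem

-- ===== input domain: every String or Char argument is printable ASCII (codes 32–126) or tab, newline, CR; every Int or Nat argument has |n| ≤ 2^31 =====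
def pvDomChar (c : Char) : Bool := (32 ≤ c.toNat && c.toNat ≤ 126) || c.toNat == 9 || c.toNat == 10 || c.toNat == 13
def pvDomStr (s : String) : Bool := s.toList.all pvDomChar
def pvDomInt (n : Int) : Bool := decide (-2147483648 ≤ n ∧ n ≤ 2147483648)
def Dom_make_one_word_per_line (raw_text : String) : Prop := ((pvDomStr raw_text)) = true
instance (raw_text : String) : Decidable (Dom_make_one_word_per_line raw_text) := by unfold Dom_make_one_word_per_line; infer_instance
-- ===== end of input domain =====

-- B replaces A's nested loop with a newline counter and its separate padding loop by one
-- comprehension whose line i is the closed form '\n'.join(words[:i]) + '\n'*(n-i)  (objective: simpler).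

-- ===== PORT A =====
-- Python str values are modelled as List Char while being accumulated (PySem.Chars is the
-- exact model of Python str); each finished line is packed back with String.ofList.
def make_one_word_per_line (raw_text : String) : List String :=
  let words := PySem.Str.split₀ raw_text
  let num_nl : Int := (words.length : Int) - 1
  (PySem.List.pyRange 1 ((words.length : Int) + 1) 1).foldl (fun lines i =>
    let st := (PySem.List.pyRange 0 i 1).foldl (fun (st : List Char × Int) x =>
      if st.2 > 0 then (st.1 ++ (PySem.List.pyGetD words x "").toList ++ ['\n'], st.2 - 1)
      else (st.1 ++ (PySem.List.pyGetD words x "").toList, st.2)) ([], num_nl)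
    let temp_text := (PySem.List.pyRange 0 st.2 1).foldl (fun (t : List Char) _ => t ++ ['\n']) st.1
    lines ++ [String.ofList temp_text]) []

-- ===== PORT B =====
def make_one_word_per_line_alt (raw_text : String) : List String :=
  let words := PySem.Str.split₀ raw_text
  let n := words.length
  (PySem.List.pyRange 1 ((n : Int) + 1) 1).map (fun i =>
    String.ofList (PySem.Chars.join ['\n'] ((PySem.List.slice words none (some i)).map String.toList)
      ++ PySem.List.pyRepeat ['\n'] ((n : Int) - i)))

-- ===== PRECONDITION & SPEC =====
def Spec_make_one_word_per_line (raw_text : String) (out : List String) : Prop := out = make_one_word_per_line_alt raw_text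
instance (raw_text : String) (out : List String) : Decidable (Spec_make_one_word_per_line raw_text out) := by unfold Spec_make_one_word_per_line; infer_instance

-- ===== CLAIM (what is proved, stated in full; the proofs are below) =====
def Claim_equal_make_one_word_per_line : Prop := ∀ (raw_text : String), Dom_make_one_word_per_line raw_text → Spec_make_one_word_per_line raw_text (make_one_word_per_line raw_text)

-- ===== LEMMAS AND PROOFS =====

-- A's inner-loop step on the state (temp_text, temp_nl)
def pvStep (words : List String) (st : List Char × Int) (x : Int) : List Char × Int :=
  if st.2 > 0 then (st.1 ++ (PySem.List.pyGetD words x "").toList ++ ['\n'], st.2 - 1)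
  else (st.1 ++ (PySem.List.pyGetD words x "").toList, st.2)

-- text produced by A's inner loop while the counter is still positive
def pvNlcat (ws : List String) : List Char := (ws.map (fun w => w.toList ++ ['\n'])).flatten

lemma pvNlcat_nil : pvNlcat [] = [] := rfl

lemma pvNlcat_append (xs ys : List String) : pvNlcat (xs ++ ys) = pvNlcat xs ++ pvNlcat ys := by
  simp [pvNlcat]

-- the padding loop appends one newline per iteration
lemma pad_loop (l : List Int) (t : List Char) :
    l.foldl (fun (t : List Char) _ => t ++ ['\n']) t = t ++ List.replicate l.length '\n' := by
  induction l generalizing t with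
  | nil => simp
  | cons a l ih => rw [List.foldl_cons, ih]; simp [List.replicate_succ]

-- A's inner loop after k iterations, while the counter stays nonnegative (k < len words)
lemma inner_loop (words : List String) (k : Nat) (hk : k + 1 ≤ words.length) :
    (PySem.List.pyRange 0 (k : Int) 1).foldl (pvStep words) ([], (words.length : Int) - 1)
      = (pvNlcat (words.take k), (words.length : Int) - 1 - k) := by
  induction k with
  | zero => simp [PySem.List.pyRange_one_eq_nil, pvNlcat_nil]
  | succ k ih =>
    have hklt : k < words.length := by omega
    rw [show ((k + 1 : Nat) : Int) = (k : Int) + 1 by push_cast; ring,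
        PySem.List.pyRange_one_succ_right (by positivity), List.foldl_append,
        ih (by omega), List.foldl_cons, List.foldl_nil]
    simp only [pvStep]
    rw [if_pos (by omega), PySem.List.pyGetD_natCast, List.getD_eq_getElem _ _ hklt,
        List.take_add_one, List.getElem?_eq_getElem hklt]
    simp only [Prod.mk.injEq]
    refine ⟨?_, by omega⟩
    rw [pvNlcat_append]
    simp [pvNlcat]

-- the word-plus-newline concatenation of a nonempty prefix is join plus one trailing newline
lemma join_eq_nlcat (ws : List String) (hne : ws ≠ []) :
    pvNlcat ws = PySem.Chars.join ['\n'] (ws.map String.toList) ++ ['\n'] := by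
  induction ws with
  | nil => exact absurd rfl hne
  | cons w t ih =>
    cases t with
    | nil => simp [pvNlcat, PySem.Chars.join_singleton]
    | cons w' t' =>
      rw [List.map_cons, List.map_cons, PySem.Chars.join_cons_cons, ← List.map_cons]
      have h := ih (by simp)
      simp only [pvNlcat, List.map_cons, List.flatten_cons] at h ⊢
      rw [h]; simp

-- the full word list joined: the last word carries no newline
lemma nlcat_concat (ys : List String) (w : String) :
    pvNlcat ys ++ w.toList = PySem.Chars.join ['\n'] ((ys ++ [w]).map String.toList) := by
  induction ys with
  | nil => simp [pvNlcat_nil, PySem.Chars.join_singleton]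
  | cons y t ih =>
    cases t with
    | nil =>
      simp only [List.nil_append, List.cons_append, List.map_cons, List.map_nil,
        PySem.Chars.join_cons_cons, PySem.Chars.join_singleton]
      simp [pvNlcat]
    | cons y' t' =>
      rw [List.cons_append, List.map_cons, show ((y' :: t') ++ [w]).map String.toList
            = y'.toList :: (t' ++ [w]).map String.toList by simp,
          PySem.Chars.join_cons_cons, show y'.toList :: (t' ++ [w]).map String.toList
            = ((y' :: t') ++ [w]).map String.toList by simp, ← ih]
      simp only [pvNlcat, List.map_cons, List.flatten_cons]
      simp

-- A's inner loop run to the very end (i = len words): the counter hits 0 before the last word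
lemma inner_full (words : List String) (hne : words ≠ []) :
    (PySem.List.pyRange 0 (words.length : Int) 1).foldl (pvStep words) ([], (words.length : Int) - 1)
      = (PySem.Chars.join ['\n'] (words.map String.toList), 0) := by
  obtain ⟨ys, w, hys⟩ := (List.eq_nil_or_concat words).resolve_left hne
  subst hys
  rw [List.concat_eq_append] at *
  have hlen : (ys ++ [w]).length = ys.length + 1 := by simp
  rw [hlen, show (((ys.length + 1 : Nat)) : Int) = ((ys.length : Nat) : Int) + 1 by push_cast; ring,
      PySem.List.pyRange_one_succ_right (by positivity), List.foldl_append]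
  have h1 := inner_loop (ys ++ [w]) ys.length (by simp)
  rw [hlen] at h1
  push_cast at h1 ⊢
  rw [h1, List.foldl_cons, List.foldl_nil]
  simp only [pvStep]
  rw [if_neg (by omega), PySem.List.pyGetD_natCast]
  have htake : (ys ++ [w]).take ys.length = ys := by simp
  have hget : (ys ++ [w]).getD ys.length "" = w := by simp
  rw [htake, hget]
  simp only [Prod.mk.injEq]
  exact ⟨nlcat_concat ys w, by omega⟩

-- one line of A equals one line of B, for every i in range(1, n+1)
lemma line_eq (words : List String) (i : Int) (h1 : 1 ≤ i) (h2 : i ≤ (words.length : Int)) :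
    (let st := (PySem.List.pyRange 0 i 1).foldl (pvStep words) ([], (words.length : Int) - 1)
     (PySem.List.pyRange 0 st.2 1).foldl (fun (t : List Char) _ => t ++ ['\n']) st.1)
    = PySem.Chars.join ['\n'] ((PySem.List.slice words none (some i)).map String.toList)
      ++ PySem.List.pyRepeat ['\n'] ((words.length : Int) - i) := by
  obtain ⟨k, rfl⟩ : ∃ k : Nat, i = (k : Int) := ⟨i.toNat, by omega⟩
  rw [PySem.List.slice_to _ (by positivity), PySem.List.pyRepeat_singleton]
  simp only [Int.toNat_natCast]
  have hk1 : 1 ≤ k := by omega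
  have hk2 : k ≤ words.length := by omega
  rcases eq_or_lt_of_le hk2 with heq | hlt
  · -- i = n : the counter reaches 0, no padding
    subst heq
    simp only [inner_full words (by intro h; subst h; simp at hk1)]
    rw [PySem.List.pyRange_one_eq_nil le_rfl, List.foldl_nil]
    simp
  · -- i < n : counter stays positive, pad with n-1-i newlines
    have htk : words.take k ≠ [] := by
      apply List.ne_nil_of_length_pos
      simp only [List.length_take]
      omega
    rw [inner_loop words k hlt]
    simp only
    rw [pad_loop, PySem.List.length_pyRange_one, join_eq_nlcat (words.take k) htk]
    have ha : ((words.length : Int) - 1 - (k : Int) - 0).toNat = words.length - 1 - k := by omega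
    have hb : ((words.length : Int) - (k : Int)).toNat = words.length - k := by omega
    rw [ha, hb]
    rw [show words.length - k = (words.length - 1 - k) + 1 by omega, List.replicate_succ]
    simp

-- ===== VERDICT (by name: the statement is the Claim_ definition above) =====
theorem make_one_word_per_line_spec : Claim_equal_make_one_word_per_line := by
  intro raw_text _
  unfold Spec_make_one_word_per_line make_one_word_per_line make_one_word_per_line_alt
  simp only
  rw [show (fun (st : List Char × Int) (x : Int) =>
        if st.2 > 0 then (st.1 ++ (PySem.List.pyGetD (PySem.Str.split₀ raw_text) x "").toList ++ ['\n'], st.2 - 1)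
        else (st.1 ++ (PySem.List.pyGetD (PySem.Str.split₀ raw_text) x "").toList, st.2))
      = pvStep (PySem.Str.split₀ raw_text) from rfl]
  rw [PySem.List.foldl_append_singleton_eq_map, List.nil_append]
  apply List.map_congr_left
  intro i hi
  rw [PySem.List.mem_pyRange_one] at hi
  have h := line_eq (PySem.Str.split₀ raw_text) i hi.1 (by omega)
  simp only at h
  rw [h]
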